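-- pv_equiv track=rewrite | github.com/JaraVictoria/SSL | todojunto_lexeryparser.py | automata_desde
-- ===== SOURCE A (Python) =====
-- def automata_desde(cadena):
-- 	estado = 0
-- 	estados_finales = [5]
--
-- 	for caracter in cadena:
-- 		if estado == 0 and caracter == "d":
-- 			estado = 1
-- 		elif estado == 1 and caracter == "e":
-- 			estado = 2
-- 		elif estado == 2 and caracter == "s":
-- 			estado = 3
-- 		elif estado == 3 and caracter == "d":
-- 			estado = 4
-- 		elif estado == 4 and caracter == "e":
-- 			estado = 5
-- 		else:
-- 			estado = -1
-- 			break
--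
-- 	if estado == -1:
-- 		return ESTADO_TRAMPA
-- 	if estado in estados_finales:
-- 		return ESTADO_FINAL
-- 	else:
-- 		return ESTADO_NO_FINAL
--
-- ESTADO_FINAL = "ESTADO ACEPTADO"
--
-- ESTADO_NO_FINAL = "ESTADO NO ACEPTADO"
--
-- ESTADO_TRAMPA = "ESTADO TRAMPA"
-- ===== SOURCE B (Python) =====
-- def automata_desde(cadena):
--     target = "desde"
--     if cadena == target:
--         return ESTADO_FINAL
--     if target.startswith(cadena):
--         return ESTADO_NO_FINAL
--     return ESTADO_TRAMPA
--
-- ESTADO_FINAL = "ESTADO ACEPTADO"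
--
-- ESTADO_NO_FINAL = "ESTADO NO ACEPTADO"
--
-- ESTADO_TRAMPA = "ESTADO TRAMPA"
-- ===== Notes on version B (the rewrite author's own statement) =====
-- stated objective: simpler
-- what changed: Replaces the character-by-character FSM transition loop with a direct closed-form classification: exact match -> final, proper prefix of "desde" (via startswith) -> non-final, anything else -> trap.
import Mathlib
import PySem

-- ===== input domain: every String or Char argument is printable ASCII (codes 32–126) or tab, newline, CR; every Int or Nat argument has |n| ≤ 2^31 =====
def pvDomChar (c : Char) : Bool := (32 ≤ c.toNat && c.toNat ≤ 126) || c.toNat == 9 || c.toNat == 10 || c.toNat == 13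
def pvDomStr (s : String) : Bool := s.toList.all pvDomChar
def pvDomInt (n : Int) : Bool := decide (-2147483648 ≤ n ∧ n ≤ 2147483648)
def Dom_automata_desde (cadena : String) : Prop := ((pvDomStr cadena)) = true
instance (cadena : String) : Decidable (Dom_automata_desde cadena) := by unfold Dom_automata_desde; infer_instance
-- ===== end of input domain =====

-- B replaces A's character-by-character FSM loop with a closed-form classification
-- (exact match / prefix of "desde" / everything else); objective: simpler.


-- ===== PORT A =====
-- the for-loop with its break: returns the state, -1 meaning the loop broke into the trap
def automataDesdeLoop : Int → List Char → Int
  | estado, [] => estado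
  | estado, c :: rest =>
    if estado == 0 && c == 'd' then automataDesdeLoop 1 rest
    else if estado == 1 && c == 'e' then automataDesdeLoop 2 rest
    else if estado == 2 && c == 's' then automataDesdeLoop 3 rest
    else if estado == 3 && c == 'd' then automataDesdeLoop 4 rest
    else if estado == 4 && c == 'e' then automataDesdeLoop 5 rest
    else (-1)

def automata_desde (cadena : String) : String :=
  let estados_finales : List Int := [5]
  let estado := automataDesdeLoop 0 cadena.toList
  if estado == -1 then "ESTADO TRAMPA"
  else if estados_finales.contains estado then "ESTADO ACEPTADO"
  else "ESTADO NO ACEPTADO"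

-- ===== PORT B =====
def automata_desde_alt (cadena : String) : String :=
  let target := "desde"
  if cadena == target then "ESTADO ACEPTADO"
  else if PySem.Str.startswith target cadena then "ESTADO NO ACEPTADO"
  else "ESTADO TRAMPA"

-- ===== PRECONDITION & SPEC =====
def Spec_automata_desde (cadena : String) (out : String) : Prop := out = automata_desde_alt cadena
instance (cadena : String) (out : String) : Decidable (Spec_automata_desde cadena out) := by unfold Spec_automata_desde; infer_instance

-- ===== CLAIM (what is proved, stated in full; the proofs are below) =====
def Claim_equal_automata_desde : Prop := ∀ (cadena : String), Dom_automata_desde cadena → Spec_automata_desde cadena (automata_desde cadena)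

-- ===== LEMMAS AND PROOFS =====

-- the loop computes: n + |cs| if cs is a prefix of what remains of "desde" after state n, else -1
theorem automataDesdeLoop_eq (cs : List Char) : ∀ (n : Int), 0 ≤ n → n ≤ 5 →
    automataDesdeLoop n cs =
      if cs <+: (List.drop n.toNat "desde".toList) then n + cs.length else -1 := by
  induction cs with
  | nil => intro n _ _; simp [automataDesdeLoop]
  | cons c rest ih =>
    intro n h0 h5
    interval_cases n <;>
      simp only [automataDesdeLoop] <;>
      [ (by_cases hc : c = 'd'); (by_cases hc : c = 'e'); (by_cases hc : c = 's');
        (by_cases hc : c = 'd'); (by_cases hc : c = 'e'); skip ] <;>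
      simp_all [ih 1, ih 2, ih 3, ih 4, ih 5, List.cons_prefix_cons] <;>
      (try (split_ifs <;> omega))

theorem automata_desde_eq_alt (cadena : String) :
    automata_desde cadena = automata_desde_alt cadena := by
  by_cases he : cadena = "desde"
  · subst he; decide
  · have h := automataDesdeLoop_eq cadena.toList 0 (by norm_num) (by norm_num)
    simp only [Int.toNat_zero, List.drop_zero, Int.zero_add] at h
    have hlen : cadena.toList.length = cadena.length := by simp
    unfold automata_desde automata_desde_alt
    by_cases hp : cadena.toList <+: "desde".toList
    · have hlt : cadena.toList.length < 5 := by
        refine lt_of_le_of_ne (by simpa using hp.length_le) (fun hl => he ?_)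
        exact String.toList_inj.mp (hp.eq_of_length (by simpa using hl))
      have hsw : PySem.Chars.startswith "desde".toList cadena.toList = true :=
        (PySem.Chars.startswith_iff _ _).mpr hp
      have hne5 : (cadena.length : Int) ≠ 5 := by omega
      have hnem1 : (cadena.length : Int) ≠ -1 := by omega
      rw [show "desde".toList = ['d','e','s','d','e'] from rfl] at hp hsw
      rw [h]
      simp [hp, hne5, hnem1, hsw, he]
    · have hsw : PySem.Chars.startswith "desde".toList cadena.toList = false :=
        Bool.eq_false_iff.mpr (fun ht => hp ((PySem.Chars.startswith_iff _ _).mp ht))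
      rw [show "desde".toList = ['d','e','s','d','e'] from rfl] at hp hsw
      rw [h]
      simp [hp, hsw, he]

-- ===== VERDICT (by name: the statement is the Claim_ definition above) =====
theorem automata_desde_spec : Claim_equal_automata_desde := by
  intro cadena _
  exact automata_desde_eq_alt cadena
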